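-- pv_equiv track=rewrite | github.com/mlibovych/youtube_captions | main.py | delete_timecodes
-- ===== SOURCE A (Python) =====
-- def delete_timecodes(captions):
--     split_captions = captions.split('\n')
--     result = []
--     count = 0
--
--     for i in range(len(split_captions)):
--         count += 1
--         if count == 3:
--             result.append(split_captions[i])
--         if count == 4:
--             count = 0
--
--     clear_captions = "\n".join(result)
--
--     return clear_captions
-- ===== SOURCE B (Python) =====
-- def delete_timecodes(captions):
--     lines = captions.split('\n')
--     result = []
--     i = 0
--     while i < len(lines):
--         block = lines[i:i + 4]
--         if len(block) >= 3:
--             result.append(block[2])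
--         i += 4
--     return "\n".join(result)
-- ===== Notes on version B (the rewrite author's own statement) =====
-- stated objective: alternative
-- what changed: Replaced the flat per-line loop with a reset counter by an index loop that steps through the line list four at a time, slicing each 4-line block and taking its third line when present.
import Mathlib
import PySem

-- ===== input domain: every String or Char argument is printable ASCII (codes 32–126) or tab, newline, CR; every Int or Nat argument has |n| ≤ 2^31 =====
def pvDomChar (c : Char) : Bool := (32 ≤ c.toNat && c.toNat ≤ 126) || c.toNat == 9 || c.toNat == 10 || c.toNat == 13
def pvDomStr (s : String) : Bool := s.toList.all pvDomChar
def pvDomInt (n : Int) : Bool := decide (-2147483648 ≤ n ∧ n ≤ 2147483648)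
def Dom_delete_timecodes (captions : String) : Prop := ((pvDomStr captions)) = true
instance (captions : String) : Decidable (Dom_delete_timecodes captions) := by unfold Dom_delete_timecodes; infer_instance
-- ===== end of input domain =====

-- B replaces A's flat counter loop by a stride-4 index loop over 4-line blocks (alternative decomposition, same cost).

-- ===== PORT A =====
-- loop body of A's for-loop: state (result, count), consuming split_captions[i]
def aStep (st : List String × Int) (x : String) : List String × Int :=
  let count := st.2 + 1
  let result := if count = 3 then st.1 ++ [x] else st.1
  (result, if count = 4 then 0 else count)

def delete_timecodes (captions : String) : String :=
  let split_captions := ((PySem.Str.split? captions "\n").getD [])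
  let st := (PySem.List.pyRange 0 (split_captions.length : Int) 1).foldl
      (fun st i => aStep st (PySem.List.pyGetD split_captions i "")) ([], 0)
  PySem.Str.join "\n" st.1

-- ===== PORT B =====
-- B's while-loop: i steps by 4, each block = lines[i:i+4], keep block[2] when len(block) >= 3
def pickLoop (lines : List String) (result : List String) (i : Int) : List String :=
  if _h : i < (lines.length : Int) then
    let block := PySem.List.slice lines (some i) (some (i + 4))
    let result := if 3 ≤ (block.length : Int) then result ++ [PySem.List.pyGetD block 2 ""] else result
    pickLoop lines result (i + 4)
  else result
termination_by ((lines.length : Int) - i).toNat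
decreasing_by omega

def delete_timecodes_alt (captions : String) : String :=
  let lines := ((PySem.Str.split? captions "\n").getD [])
  PySem.Str.join "\n" (pickLoop lines [] 0)

-- ===== PRECONDITION & SPEC =====
def Spec_delete_timecodes (captions : String) (out : String) : Prop := out = delete_timecodes_alt captions
instance (captions : String) (out : String) : Decidable (Spec_delete_timecodes captions out) := by unfold Spec_delete_timecodes; infer_instance

-- ===== CLAIM (what is proved, stated in full; the proofs are below) =====
def Claim_equal_delete_timecodes : Prop := ∀ (captions : String), Dom_delete_timecodes captions → Spec_delete_timecodes captions (delete_timecodes captions)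

-- ===== LEMMAS AND PROOFS =====

-- abstract "third line of each 4-block" chunker both loops compute
def gChunks : List String → List String
  | [] => []
  | [_] => []
  | [_, _] => []
  | _ :: _ :: c :: rest => c :: gChunks (rest.drop 1)
termination_by l => l.length
decreasing_by simp; omega

theorem aFold_eq_gChunks (l res : List String) :
    (l.foldl (fun st x => aStep st x) (res, 0)).1 = res ++ gChunks l := by
  match l with
  | [] => simp [gChunks]
  | [a] => simp [List.foldl_cons, List.foldl_nil, aStep, gChunks]
  | [a, b] => simp [List.foldl_cons, List.foldl_nil, aStep, gChunks]
  | [a, b, c] => simp [List.foldl_cons, List.foldl_nil, aStep, gChunks]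
  | a :: b :: c :: d :: t =>
    have ih := aFold_eq_gChunks t (res ++ [c])
    simp only [List.foldl_cons, aStep] at ih ⊢
    norm_num at ih ⊢
    rw [ih]
    simp [gChunks]
termination_by l.length

theorem pickLoop_eq_gChunks (lines : List String) (k : Nat) (out : List String) :
    pickLoop lines out (k : Int) = out ++ gChunks (lines.drop k) := by
  rw [pickLoop]
  split
  case isTrue h =>
    have hk : k < lines.length := by exact_mod_cast h
    have hblock : PySem.List.slice lines (some (k : Int)) (some ((k : Int) + 4)) =
        (lines.drop k).take 4 := by
      have h4 : (k : Int) + 4 = ((k + 4 : Nat) : Int) := by push_cast; ring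
      rw [h4, PySem.List.slice_natCast]
      congr 1
      omega
    have hcast : (k : Int) + 4 = ((k + 4 : Nat) : Int) := by push_cast; ring
    rw [hblock, hcast, pickLoop_eq_gChunks lines (k + 4) _]
    have hdrop : lines.drop (k + 4) = (lines.drop k).drop 4 := by
      rw [List.drop_drop]
    rw [hdrop]
    have hne : lines.drop k ≠ [] := by
      simp [List.drop_eq_nil_iff]; omega
    match hl : lines.drop k with
    | [] => exact absurd hl hne
    | [a] => simp [gChunks]
    | [a, b] => simp [gChunks]
    | a :: b :: c :: rest =>
      have h3 : 3 ≤ (((a :: b :: c :: rest).take 4).length : Int) := by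
        simp [List.length_take]
        omega
      rw [if_pos h3]
      have hg : PySem.List.pyGetD ((a :: b :: c :: rest).take 4) 2 "" = c := by
        cases rest <;> simp [PySem.List.pyGetD]
      rw [hg]
      cases rest <;> simp [gChunks]
  case isFalse h =>
    have : lines.drop k = [] := by
      rw [List.drop_eq_nil_iff]; omega
    simp [this, gChunks]
termination_by lines.length - k
decreasing_by omega

-- ===== VERDICT (by name: the statement is the Claim_ definition above) =====
theorem delete_timecodes_spec : Claim_equal_delete_timecodes := by
  intro captions _
  unfold Spec_delete_timecodes delete_timecodes delete_timecodes_alt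
  simp only
  rw [PySem.List.foldl_pyRange_zero_pyGetD' (((PySem.Str.split? captions "\n").getD [])) "" (fun st x => aStep st x) ([], 0)]
  rw [aFold_eq_gChunks]
  have := pickLoop_eq_gChunks (((PySem.Str.split? captions "\n").getD [])) 0 []
  simp at this ⊢
  rw [this]
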